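-- pv_equiv track=rewrite | github.com/pkr465/care | agents/codebase_fixer_agent.py | _count_braces_outside_strings
-- ===== SOURCE A (Python) =====
-- from typing import List, Dict, Optional, Tuple, Any
--
-- def _count_braces_outside_strings(text: str) -> Tuple[int, int]:
--     """Count { and } braces, ignoring those inside strings, char literals,
--     single-line comments (//), and multi-line comments (/* */).
--
--     Returns (open_count, close_count).
--     """
--     open_count = 0
--     close_count = 0
--     in_string = False
--     in_char = False
--     in_line_comment = False
--     in_block_comment = False
--     i = 0
--     length = len(text)
--
--     while i < length:
--         ch = text[i]
--         prev_ch = text[i - 1] if i > 0 else ''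
--
--         # --- Block comment transitions ---
--         if in_block_comment:
--             if ch == '/' and prev_ch == '*':
--                 in_block_comment = False
--             i += 1
--             continue
--         # --- Line comment transitions ---
--         if in_line_comment:
--             if ch == '\n':
--                 in_line_comment = False
--             i += 1
--             continue
--         # --- String transitions ---
--         if in_string:
--             if ch == '"' and prev_ch != '\\':
--                 in_string = False
--             i += 1
--             continue
--         # --- Char literal transitions ---
--         if in_char:
--             if ch == "'" and prev_ch != '\\':
--                 in_char = False
--             i += 1
--             continue
--
--         # --- Detect comment/string starts ---
--         if ch == '/' and i + 1 < length:
--             next_ch = text[i + 1]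
--             if next_ch == '/':
--                 in_line_comment = True
--                 i += 2
--                 continue
--             if next_ch == '*':
--                 in_block_comment = True
--                 i += 2
--                 continue
--         if ch == '"':
--             in_string = True
--             i += 1
--             continue
--         if ch == "'":
--             in_char = True
--             i += 1
--             continue
--
--         # --- Count braces ---
--         if ch == '{':
--             open_count += 1
--         elif ch == '}':
--             close_count += 1
--
--         i += 1
--
--     return open_count, close_count
-- ===== SOURCE B (Python) =====
-- def _count_braces_outside_strings(text):
--     """Count { and } outside strings/char literals/comments by jumping over
--     skipped regions with str.find instead of per-character state flags."""
--     n = len(text)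
--     open_count = 0
--     close_count = 0
--
--     def skip_quoted(i, q):
--         # i: first index inside the literal; returns the index just past the
--         # closing quote (close = quote not immediately preceded by a backslash),
--         # or n if unterminated.
--         while True:
--             j = text.find(q, i)
--             if j < 0:
--                 return n
--             if text[j - 1] != '\\':
--                 return j + 1
--             i = j + 1
--
--     i = 0
--     while i < n:
--         ch = text[i]
--         if ch == '/' and i + 1 < n and text[i + 1] == '/':
--             j = text.find('\n', i + 2)
--             i = n if j < 0 else j + 1
--         elif ch == '/' and i + 1 < n and text[i + 1] == '*':
--             k = text.find('*/', i + 1)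
--             i = n if k < 0 else k + 2
--         elif ch == '"':
--             i = skip_quoted(i + 1, '"')
--         elif ch == "'":
--             i = skip_quoted(i + 1, "'")
--         else:
--             if ch == '{':
--                 open_count += 1
--             elif ch == '}':
--                 close_count += 1
--             i += 1
--     return open_count, close_count
-- ===== Notes on version B (the rewrite author's own statement) =====
-- stated objective: alternative
-- what changed: Replaces A's per-character boolean-flag state machine with a jump-based scanner that, on seeing a string/char/comment opener, uses str.find to locate the closing delimiter and skips the whole region at once, counting braces only in the code spans.
import Mathlib
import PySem

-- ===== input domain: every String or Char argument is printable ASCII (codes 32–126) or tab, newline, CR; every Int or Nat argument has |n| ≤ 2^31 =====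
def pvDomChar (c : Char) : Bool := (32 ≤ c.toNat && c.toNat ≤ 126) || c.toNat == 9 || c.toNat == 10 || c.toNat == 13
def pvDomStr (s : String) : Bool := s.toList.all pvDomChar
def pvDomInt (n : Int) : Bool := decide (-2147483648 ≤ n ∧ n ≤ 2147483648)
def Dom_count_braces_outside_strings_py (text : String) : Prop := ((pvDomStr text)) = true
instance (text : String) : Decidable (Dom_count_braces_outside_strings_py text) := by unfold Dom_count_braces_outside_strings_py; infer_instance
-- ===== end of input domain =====

-- B replaces A's per-character boolean-flag state machine by find-based jumps over
-- string/char-literal/comment regions (objective: alternative decomposition); proved equal on all inputs.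

-- ===== PORT A =====
-- aLoop: literal transliteration of A's while loop; parameters are A's locals
-- (i, open_count, close_count, in_string, in_char, in_line_comment, in_block_comment);
-- Python's prev_ch = '' is modelled as `none : Option Char`.  `fuel` is only a
-- structural totality guard: one unit per iteration, and t.length units always
-- suffice because i grows by at least 1 while the loop runs.
def aLoop (t : List Char) : Nat → Nat → Int → Int → Bool → Bool → Bool → Bool → Int × Int
  | 0, _, oc, cc, _, _, _, _ => (oc, cc)
  | fuel + 1, i, oc, cc, instr, inch, inline, inblk =>
    if i < t.length then
      -- ch = text[i], prev = text[i-1] ('' at i = 0), inlined at each use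
      if inblk then
        (if t.getD i ' ' = '/' ∧ (if 0 < i then some (t.getD (i - 1) ' ') else none) = some '*' then
          aLoop t fuel (i + 1) oc cc instr inch inline false
        else
          aLoop t fuel (i + 1) oc cc instr inch inline inblk)
      else if inline then
        (if t.getD i ' ' = '\n' then aLoop t fuel (i + 1) oc cc instr inch false inblk
         else aLoop t fuel (i + 1) oc cc instr inch inline inblk)
      else if instr then
        (if t.getD i ' ' = '"' ∧ (if 0 < i then some (t.getD (i - 1) ' ') else none) ≠ some '\\' then aLoop t fuel (i + 1) oc cc false inch inline inblk
         else aLoop t fuel (i + 1) oc cc instr inch inline inblk)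
      else if inch then
        (if t.getD i ' ' = '\'' ∧ (if 0 < i then some (t.getD (i - 1) ' ') else none) ≠ some '\\' then aLoop t fuel (i + 1) oc cc instr false inline inblk
         else aLoop t fuel (i + 1) oc cc instr inch inline inblk)
      else if t.getD i ' ' = '/' ∧ i + 1 < t.length ∧ t.getD (i + 1) ' ' = '/' then
        aLoop t fuel (i + 2) oc cc instr inch true inblk
      else if t.getD i ' ' = '/' ∧ i + 1 < t.length ∧ t.getD (i + 1) ' ' = '*' then
        aLoop t fuel (i + 2) oc cc instr inch inline true
      else if t.getD i ' ' = '"' then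
        aLoop t fuel (i + 1) oc cc true inch inline inblk
      else if t.getD i ' ' = '\'' then
        aLoop t fuel (i + 1) oc cc instr true inline inblk
      else if t.getD i ' ' = '{' then
        aLoop t fuel (i + 1) (oc + 1) cc instr inch inline inblk
      else if t.getD i ' ' = '}' then
        aLoop t fuel (i + 1) oc (cc + 1) instr inch inline inblk
      else
        aLoop t fuel (i + 1) oc cc instr inch inline inblk
    else (oc, cc)

def count_braces_outside_strings_py (text : String) : Int × Int :=
  aLoop text.toList text.toList.length 0 0 0 false false false false

-- ===== PORT B =====
-- findFrom t c fuel i = Python's text.find(c, i): smallest j ≥ i with t[j] = c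
-- (exact hand port of the scan; fuel = t.length always suffices).
def findFrom (t : List Char) (c : Char) : Nat → Nat → Option Nat
  | 0, _ => none
  | fuel + 1, i =>
    if i < t.length then
      (if t.getD i ' ' = c then some i else findFrom t c fuel (i + 1))
    else none

-- find2From t fuel i = Python's text.find('*/', i) (exact hand port of the two-char scan).
def find2From (t : List Char) : Nat → Nat → Option Nat
  | 0, _ => none
  | fuel + 1, i =>
    if i + 1 < t.length then
      (if t.getD i ' ' = '*' ∧ t.getD (i + 1) ' ' = '/' then some i
       else find2From t fuel (i + 1))
    else none

-- skip_quoted of Source B: repeated find for the next quote not immediately preceded by '\'.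
def skipQuoted (t : List Char) (q : Char) : Nat → Nat → Nat
  | 0, _ => t.length
  | fuel + 1, i =>
    match findFrom t q t.length i with
    | none => t.length
    | some j =>
        if t.getD (j - 1) ' ' ≠ '\\' then j + 1
        else skipQuoted t q fuel (j + 1)

-- bLoop: transliteration of Source B's main while loop (fuel again a totality guard).
def bLoop (t : List Char) : Nat → Nat → Int → Int → Int × Int
  | 0, _, oc, cc => (oc, cc)
  | fuel + 1, i, oc, cc =>
    if i < t.length then
      if t.getD i ' ' = '/' ∧ i + 1 < t.length ∧ t.getD (i + 1) ' ' = '/' then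
        match findFrom t '\n' t.length (i + 2) with
        | none => bLoop t fuel t.length oc cc
        | some j => bLoop t fuel (j + 1) oc cc
      else if t.getD i ' ' = '/' ∧ i + 1 < t.length ∧ t.getD (i + 1) ' ' = '*' then
        match find2From t t.length (i + 1) with
        | none => bLoop t fuel t.length oc cc
        | some k => bLoop t fuel (k + 2) oc cc
      else if t.getD i ' ' = '"' then
        bLoop t fuel (skipQuoted t '"' t.length (i + 1)) oc cc
      else if t.getD i ' ' = '\'' then
        bLoop t fuel (skipQuoted t '\'' t.length (i + 1)) oc cc
      else if t.getD i ' ' = '{' then bLoop t fuel (i + 1) (oc + 1) cc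
      else if t.getD i ' ' = '}' then bLoop t fuel (i + 1) oc (cc + 1)
      else bLoop t fuel (i + 1) oc cc
    else (oc, cc)

def count_braces_outside_strings_py_alt (text : String) : Int × Int :=
  bLoop text.toList text.toList.length 0 0 0

-- ===== PRECONDITION & SPEC =====
def Spec_count_braces_outside_strings_py (text : String) (out : Int × Int) : Prop := out = count_braces_outside_strings_py_alt text
instance (text : String) (out : Int × Int) : Decidable (Spec_count_braces_outside_strings_py text out) := by unfold Spec_count_braces_outside_strings_py; infer_instance

-- ===== CLAIM (what is proved, stated in full; the proofs are below) =====
def Claim_equal_count_braces_outside_strings_py : Prop := ∀ (text : String), Dom_count_braces_outside_strings_py text → Spec_count_braces_outside_strings_py text (count_braces_outside_strings_py text)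

-- ===== LEMMAS AND PROOFS =====

theorem aLoop_end (t : List Char) (fuel i : Nat) (oc cc : Int) (a b c d : Bool)
    (h : ¬ i < t.length) : aLoop t fuel i oc cc a b c d = (oc, cc) := by
  cases fuel <;> simp [aLoop, h]

theorem bLoop_end (t : List Char) (fuel i : Nat) (oc cc : Int)
    (h : ¬ i < t.length) : bLoop t fuel i oc cc = (oc, cc) := by
  cases fuel <;> simp [bLoop, h]

theorem findFrom_none (t : List Char) (c : Char) (fuel i : Nat)
    (h : ¬ i < t.length) : findFrom t c fuel i = none := by
  cases fuel <;> simp [findFrom, h]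

theorem findFrom_bounds (t : List Char) (c : Char) :
    ∀ fuel i j, findFrom t c fuel i = some j → i ≤ j ∧ j < t.length := by
  intro fuel
  induction fuel with
  | zero => intro i j hj; simp [findFrom] at hj
  | succ f ih =>
      intro i j hj
      rw [findFrom] at hj
      split_ifs at hj with h1 h2
      · cases hj; omega
      · have := ih (i + 1) j hj; omega

theorem findFrom_fuel (t : List Char) (c : Char) :
    ∀ f1 f2 i, t.length ≤ i + f1 → t.length ≤ i + f2 →
      findFrom t c f1 i = findFrom t c f2 i := by
  intro f1
  induction f1 with
  | zero =>
      intro f2 i h1 h2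
      rw [findFrom_none t c 0 i (by omega), findFrom_none t c f2 i (by omega)]
  | succ f ih =>
      intro f2 i h1 h2
      by_cases h : i < t.length
      · obtain ⟨g, rfl⟩ : ∃ g, f2 = g + 1 := ⟨f2 - 1, by omega⟩
        rw [findFrom, findFrom, if_pos h, if_pos h]
        by_cases hc : t.getD i ' ' = c
        · rw [if_pos hc, if_pos hc]
        · rw [if_neg hc, if_neg hc]
          exact ih g (i + 1) (by omega) (by omega)
      · rw [findFrom_none t c _ i h, findFrom_none t c _ i h]

-- one canonical-fuel unfolding step of findFrom
theorem findFrom_step (t : List Char) (c : Char) (i : Nat) (h : i < t.length) :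
    findFrom t c t.length i
      = if t.getD i ' ' = c then some i else findFrom t c t.length (i + 1) := by
  rw [findFrom_fuel t c t.length (t.length + 1) i (by omega) (by omega), findFrom, if_pos h]

theorem find2From_none (t : List Char) (fuel i : Nat)
    (h : ¬ i + 1 < t.length) : find2From t fuel i = none := by
  cases fuel <;> simp [find2From, h]

theorem find2From_bounds (t : List Char) :
    ∀ fuel i k, find2From t fuel i = some k → i ≤ k ∧ k + 1 < t.length := by
  intro fuel
  induction fuel with
  | zero => intro i k hk; simp [find2From] at hk
  | succ f ih =>
      intro i k hk
      rw [find2From] at hk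
      split_ifs at hk with h1 h2
      · cases hk; omega
      · have := ih (i + 1) k hk; omega

theorem find2From_fuel (t : List Char) :
    ∀ f1 f2 i, t.length ≤ i + f1 + 1 → t.length ≤ i + f2 + 1 →
      find2From t f1 i = find2From t f2 i := by
  intro f1
  induction f1 with
  | zero =>
      intro f2 i h1 h2
      rw [find2From_none t 0 i (by omega), find2From_none t f2 i (by omega)]
  | succ f ih =>
      intro f2 i h1 h2
      by_cases h : i + 1 < t.length
      · obtain ⟨g, rfl⟩ : ∃ g, f2 = g + 1 := ⟨f2 - 1, by omega⟩
        rw [find2From, find2From, if_pos h, if_pos h]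
        by_cases hc : t.getD i ' ' = '*' ∧ t.getD (i + 1) ' ' = '/'
        · rw [if_pos hc, if_pos hc]
        · rw [if_neg hc, if_neg hc]
          exact ih g (i + 1) (by omega) (by omega)
      · rw [find2From_none t _ i h, find2From_none t _ i h]

-- one canonical-fuel unfolding step of find2From
theorem find2From_step (t : List Char) (i : Nat) (h : i + 1 < t.length) :
    find2From t t.length i
      = if t.getD i ' ' = '*' ∧ t.getD (i + 1) ' ' = '/' then some i
        else find2From t t.length (i + 1) := by
  rw [find2From_fuel t t.length (t.length + 1) i (by omega) (by omega), find2From, if_pos h]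

theorem skipQuoted_end (t : List Char) (q : Char) (fuel i : Nat)
    (h : ¬ i < t.length) : skipQuoted t q fuel i = t.length := by
  cases fuel with
  | zero => rfl
  | succ f => rw [skipQuoted, findFrom_none t q t.length i h]

theorem skipQuoted_bounds (t : List Char) (q : Char) :
    ∀ fuel i, i ≤ t.length → i ≤ skipQuoted t q fuel i ∧ skipQuoted t q fuel i ≤ t.length := by
  intro fuel
  induction fuel with
  | zero => intro i hi; exact ⟨hi, Nat.le_refl _⟩
  | succ f ih =>
      intro i hi
      rw [skipQuoted]
      cases hf : findFrom t q t.length i with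
      | none => exact ⟨hi, Nat.le_refl _⟩
      | some j =>
          have hb := findFrom_bounds t q t.length i j hf
          dsimp only
          split_ifs
          · omega
          · have := ih (j + 1) (by omega); omega

theorem skipQuoted_fuel (t : List Char) (q : Char) :
    ∀ f1 f2 i, t.length ≤ i + f1 → t.length ≤ i + f2 →
      skipQuoted t q f1 i = skipQuoted t q f2 i := by
  intro f1
  induction f1 with
  | zero =>
      intro f2 i h1 h2
      rw [skipQuoted_end t q 0 i (by omega), skipQuoted_end t q f2 i (by omega)]
  | succ f ih =>
      intro f2 i h1 h2
      by_cases h : i < t.length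
      · obtain ⟨g, rfl⟩ : ∃ g, f2 = g + 1 := ⟨f2 - 1, by omega⟩
        rw [skipQuoted, skipQuoted]
        cases hf : findFrom t q t.length i with
        | none => rfl
        | some j =>
            have hb := findFrom_bounds t q t.length i j hf
            dsimp only
            split_ifs
            · rfl
            · exact ih g (j + 1) (by omega) (by omega)
      · rw [skipQuoted_end t q _ i h, skipQuoted_end t q _ i h]

-- one canonical-fuel unfolding step of skipQuoted
theorem skipQuoted_step (t : List Char) (q : Char) (i : Nat) :
    skipQuoted t q t.length i
      = match findFrom t q t.length i with
        | none => t.length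
        | some j =>
            if t.getD (j - 1) ' ' ≠ '\\' then j + 1
            else skipQuoted t q t.length (j + 1) := by
  rw [skipQuoted_fuel t q t.length (t.length + 1) i (by omega) (by omega), skipQuoted]

-- Fuel irrelevance for A's loop: any two sufficient fuels give the same run.
theorem aLoop_fuel (t : List Char) :
    ∀ f1 f2 i oc cc a b c d, t.length ≤ i + f1 → t.length ≤ i + f2 →
      aLoop t f1 i oc cc a b c d = aLoop t f2 i oc cc a b c d := by
  intro f1
  induction f1 with
  | zero =>
      intro f2 i oc cc a b c d h1 h2
      rw [aLoop_end t 0 i oc cc a b c d (by omega), aLoop_end t f2 i oc cc a b c d (by omega)]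
  | succ f ih =>
      intro f2 i oc cc a b c d h1 h2
      by_cases h : i < t.length
      · obtain ⟨g, rfl⟩ : ∃ g, f2 = g + 1 := ⟨f2 - 1, by omega⟩
        rw [aLoop, aLoop, if_pos h, if_pos h]
        by_cases hd : d = true
        · rw [if_pos hd, if_pos hd]
          by_cases x1 : t.getD i ' ' = '/' ∧ (if 0 < i then some (t.getD (i - 1) ' ') else none) = some '*'
          · rw [if_pos x1, if_pos x1]; apply ih <;> omega
          · rw [if_neg x1, if_neg x1]; apply ih <;> omega
        · rw [if_neg hd, if_neg hd]
          by_cases hc3 : c = true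
          · rw [if_pos hc3, if_pos hc3]
            by_cases x2 : t.getD i ' ' = '\n'
            · rw [if_pos x2, if_pos x2]; apply ih <;> omega
            · rw [if_neg x2, if_neg x2]; apply ih <;> omega
          · rw [if_neg hc3, if_neg hc3]
            by_cases ha : a = true
            · rw [if_pos ha, if_pos ha]
              by_cases x3 : t.getD i ' ' = '"' ∧ (if 0 < i then some (t.getD (i - 1) ' ') else none) ≠ some '\\'
              · rw [if_pos x3, if_pos x3]; apply ih <;> omega
              · rw [if_neg x3, if_neg x3]; apply ih <;> omega
            · rw [if_neg ha, if_neg ha]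
              by_cases hb : b = true
              · rw [if_pos hb, if_pos hb]
                by_cases x4 : t.getD i ' ' = '\'' ∧ (if 0 < i then some (t.getD (i - 1) ' ') else none) ≠ some '\\'
                · rw [if_pos x4, if_pos x4]; apply ih <;> omega
                · rw [if_neg x4, if_neg x4]; apply ih <;> omega
              · rw [if_neg hb, if_neg hb]
                by_cases x5 : t.getD i ' ' = '/' ∧ i + 1 < t.length ∧ t.getD (i + 1) ' ' = '/'
                · rw [if_pos x5, if_pos x5]; apply ih <;> omega
                · rw [if_neg x5, if_neg x5]
                  by_cases x6 : t.getD i ' ' = '/' ∧ i + 1 < t.length ∧ t.getD (i + 1) ' ' = '*'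
                  · rw [if_pos x6, if_pos x6]; apply ih <;> omega
                  · rw [if_neg x6, if_neg x6]
                    by_cases x7 : t.getD i ' ' = '"'
                    · rw [if_pos x7, if_pos x7]; apply ih <;> omega
                    · rw [if_neg x7, if_neg x7]
                      by_cases x8 : t.getD i ' ' = '\''
                      · rw [if_pos x8, if_pos x8]; apply ih <;> omega
                      · rw [if_neg x8, if_neg x8]
                        by_cases x9 : t.getD i ' ' = '{'
                        · rw [if_pos x9, if_pos x9]; apply ih <;> omega
                        · rw [if_neg x9, if_neg x9]
                          by_cases x10 : t.getD i ' ' = '}'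
                          · rw [if_pos x10, if_pos x10]; apply ih <;> omega
                          · rw [if_neg x10, if_neg x10]; apply ih <;> omega
      · rw [aLoop_end t _ i oc cc a b c d h, aLoop_end t _ i oc cc a b c d h]

-- index just past a line comment whose body starts at i
def lineExit (t : List Char) (i : Nat) : Nat :=
  match findFrom t '\n' t.length i with
  | none => t.length
  | some j => j + 1

-- index just past a block comment whose body starts at i (the opening '*' is at i - 1)
def blockExit (t : List Char) (i : Nat) : Nat :=
  match find2From t t.length (i - 1) with
  | none => t.length
  | some k => k + 2

-- A's line-comment scan from i lands exactly at lineExit t i, back in plain-code state.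
theorem line_skip (t : List Char) (oc cc : Int) :
    ∀ fuel i, t.length ≤ i + fuel →
      aLoop t fuel i oc cc false false true false
        = aLoop t t.length (lineExit t i) oc cc false false false false := by
  intro fuel
  induction fuel with
  | zero =>
      intro i hsf
      have hE : lineExit t i = t.length := by
        unfold lineExit; rw [findFrom_none t '\n' t.length i (by omega)]
      rw [hE, aLoop_end t 0 i oc cc _ _ _ _ (by omega),
        aLoop_end t t.length t.length oc cc _ _ _ _ (by omega)]
  | succ f ih =>
      intro i hsf
      by_cases h : i < t.length
      · by_cases hc : t.getD i ' ' = '\n'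
        · have hE : lineExit t i = i + 1 := by
            unfold lineExit; rw [findFrom_step t '\n' i h, if_pos hc]
          rw [aLoop, if_pos h, hE]
          simp only [Bool.false_eq_true, ↓reduceIte, if_pos hc]
          exact aLoop_fuel t f t.length (i + 1) oc cc _ _ _ _ (by omega) (by omega)
        · have hE : lineExit t i = lineExit t (i + 1) := by
            unfold lineExit; rw [findFrom_step t '\n' i h, if_neg hc]
          rw [aLoop, if_pos h, hE]
          simp only [Bool.false_eq_true, ↓reduceIte, if_neg hc]
          exact ih (i + 1) (by omega)
      · have hE : lineExit t i = t.length := by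
          unfold lineExit; rw [findFrom_none t '\n' t.length i h]
        rw [hE, aLoop_end t _ i oc cc _ _ _ _ h,
          aLoop_end t t.length t.length oc cc _ _ _ _ (by omega)]

-- A's block-comment scan from i (the opening '*' sits at i - 1) lands exactly at blockExit t i.
theorem block_skip (t : List Char) (oc cc : Int) :
    ∀ fuel i, 1 ≤ i → t.length ≤ i + fuel →
      aLoop t fuel i oc cc false false false true
        = aLoop t t.length (blockExit t i) oc cc false false false false := by
  intro fuel
  induction fuel with
  | zero =>
      intro i hi hsf
      have hE : blockExit t i = t.length := by
        unfold blockExit; rw [find2From_none t t.length (i - 1) (by omega)]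
      rw [hE, aLoop_end t 0 i oc cc _ _ _ _ (by omega),
        aLoop_end t t.length t.length oc cc _ _ _ _ (by omega)]
  | succ f ih =>
      intro i hi hsf
      obtain ⟨i', rfl⟩ : ∃ i', i = i' + 1 := ⟨i - 1, by omega⟩
      by_cases h : i' + 1 < t.length
      · by_cases hc : t.getD (i' + 1) ' ' = '/' ∧ some (t.getD i' ' ') = some '*'
        · have hc2 : t.getD i' ' ' = '*' ∧ t.getD (i' + 1) ' ' = '/' :=
            ⟨Option.some.inj hc.2, hc.1⟩
          have hE : blockExit t (i' + 1) = i' + 1 + 1 := by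
            unfold blockExit
            rw [Nat.add_sub_cancel, find2From_step t i' h, if_pos hc2]
          rw [aLoop, if_pos h, hE]
          simp only [Bool.false_eq_true, ↓reduceIte, Nat.add_sub_cancel,
            if_pos (Nat.succ_pos i')]
          rw [if_pos hc]
          exact aLoop_fuel t f t.length (i' + 1 + 1) oc cc _ _ _ _ (by omega) (by omega)
        · have hc2 : ¬ (t.getD i' ' ' = '*' ∧ t.getD (i' + 1) ' ' = '/') := by
            intro hx; exact hc ⟨hx.2, congrArg some hx.1⟩
          have hE : blockExit t (i' + 1) = blockExit t (i' + 1 + 1) := by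
            unfold blockExit
            simp only [Nat.add_sub_cancel]
            rw [find2From_step t i' h, if_neg hc2]
          rw [aLoop, if_pos h, hE]
          simp only [Bool.false_eq_true, ↓reduceIte, Nat.add_sub_cancel,
            if_pos (Nat.succ_pos i')]
          rw [if_neg hc]
          exact ih (i' + 1 + 1) (by omega) (by omega)
      · have hE : blockExit t (i' + 1) = t.length := by
          unfold blockExit; rw [Nat.add_sub_cancel, find2From_none t t.length i' h]
        rw [hE, aLoop_end t _ _ oc cc _ _ _ _ h,
          aLoop_end t t.length t.length oc cc _ _ _ _ (by omega)]

theorem str_skip (t : List Char) (oc cc : Int) :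
    ∀ fuel i, 1 ≤ i → t.length ≤ i + fuel →
      aLoop t fuel i oc cc true false false false
        = aLoop t t.length (skipQuoted t '"' t.length i) oc cc false false false false := by
  intro fuel
  induction fuel with
  | zero =>
      intro i hi hsf
      rw [skipQuoted_end t '"' t.length i (by omega),
        aLoop_end t 0 i oc cc _ _ _ _ (by omega),
        aLoop_end t t.length t.length oc cc _ _ _ _ (by omega)]
  | succ f ih =>
      intro i hi hsf
      obtain ⟨i', rfl⟩ : ∃ i', i = i' + 1 := ⟨i - 1, by omega⟩
      by_cases h : i' + 1 < t.length
      · by_cases hc : t.getD (i' + 1) ' ' = '"'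
        · have hF : findFrom t '"' t.length (i' + 1) = some (i' + 1) := by
            rw [findFrom_step t '"' (i' + 1) h, if_pos hc]
          by_cases hb : t.getD i' ' ' = '\\'
          · have hE : skipQuoted t '"' t.length (i' + 1)
                = skipQuoted t '"' t.length (i' + 1 + 1) := by
              rw [skipQuoted_step, hF]
              dsimp only
              rw [Nat.add_sub_cancel, if_neg (not_not_intro hb)]
            have hnc : ¬ (t.getD (i' + 1) ' ' = '"' ∧ some (t.getD i' ' ') ≠ some '\\') := by
              rw [hb]; simp
            rw [aLoop, if_pos h, hE]
            simp only [Bool.false_eq_true, ↓reduceIte, Nat.add_sub_cancel,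
              if_pos (Nat.succ_pos i')]
            rw [if_neg hnc]
            exact ih (i' + 1 + 1) (by omega) (by omega)
          · have hE : skipQuoted t '"' t.length (i' + 1) = i' + 1 + 1 := by
              rw [skipQuoted_step, hF]
              dsimp only
              rw [Nat.add_sub_cancel, if_pos hb]
            have hyc : t.getD (i' + 1) ' ' = '"' ∧ some (t.getD i' ' ') ≠ some '\\' :=
              ⟨hc, by simpa using hb⟩
            rw [aLoop, if_pos h, hE]
            simp only [Bool.false_eq_true, ↓reduceIte, Nat.add_sub_cancel,
              if_pos (Nat.succ_pos i')]
            rw [if_pos hyc]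
            exact aLoop_fuel t f t.length (i' + 1 + 1) oc cc _ _ _ _ (by omega) (by omega)
        · have hF : findFrom t '"' t.length (i' + 1) = findFrom t '"' t.length (i' + 1 + 1) := by
            rw [findFrom_step t '"' (i' + 1) h, if_neg hc]
          have hE : skipQuoted t '"' t.length (i' + 1)
              = skipQuoted t '"' t.length (i' + 1 + 1) := by
            rw [skipQuoted_step, hF, ← skipQuoted_step]
          have hnc : ¬ (t.getD (i' + 1) ' ' = '"' ∧ some (t.getD i' ' ') ≠ some '\\') := by
            intro hx; exact hc hx.1
          rw [aLoop, if_pos h, hE]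
          simp only [Bool.false_eq_true, ↓reduceIte, Nat.add_sub_cancel,
            if_pos (Nat.succ_pos i')]
          rw [if_neg hnc]
          exact ih (i' + 1 + 1) (by omega) (by omega)
      · rw [skipQuoted_end t '"' t.length (i' + 1) h,
          aLoop_end t _ _ oc cc _ _ _ _ h,
          aLoop_end t t.length t.length oc cc _ _ _ _ (by omega)]

theorem chr_skip (t : List Char) (oc cc : Int) :
    ∀ fuel i, 1 ≤ i → t.length ≤ i + fuel →
      aLoop t fuel i oc cc false true false false
        = aLoop t t.length (skipQuoted t '\'' t.length i) oc cc false false false false := by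
  intro fuel
  induction fuel with
  | zero =>
      intro i hi hsf
      rw [skipQuoted_end t '\'' t.length i (by omega),
        aLoop_end t 0 i oc cc _ _ _ _ (by omega),
        aLoop_end t t.length t.length oc cc _ _ _ _ (by omega)]
  | succ f ih =>
      intro i hi hsf
      obtain ⟨i', rfl⟩ : ∃ i', i = i' + 1 := ⟨i - 1, by omega⟩
      by_cases h : i' + 1 < t.length
      · by_cases hc : t.getD (i' + 1) ' ' = '\''
        · have hF : findFrom t '\'' t.length (i' + 1) = some (i' + 1) := by
            rw [findFrom_step t '\'' (i' + 1) h, if_pos hc]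
          by_cases hb : t.getD i' ' ' = '\\'
          · have hE : skipQuoted t '\'' t.length (i' + 1)
                = skipQuoted t '\'' t.length (i' + 1 + 1) := by
              rw [skipQuoted_step, hF]
              dsimp only
              rw [Nat.add_sub_cancel, if_neg (not_not_intro hb)]
            have hnc : ¬ (t.getD (i' + 1) ' ' = '\'' ∧ some (t.getD i' ' ') ≠ some '\\') := by
              rw [hb]; simp
            rw [aLoop, if_pos h, hE]
            simp only [Bool.false_eq_true, ↓reduceIte, Nat.add_sub_cancel,
              if_pos (Nat.succ_pos i')]
            rw [if_neg hnc]
            exact ih (i' + 1 + 1) (by omega) (by omega)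
          · have hE : skipQuoted t '\'' t.length (i' + 1) = i' + 1 + 1 := by
              rw [skipQuoted_step, hF]
              dsimp only
              rw [Nat.add_sub_cancel, if_pos hb]
            have hyc : t.getD (i' + 1) ' ' = '\'' ∧ some (t.getD i' ' ') ≠ some '\\' :=
              ⟨hc, by simpa using hb⟩
            rw [aLoop, if_pos h, hE]
            simp only [Bool.false_eq_true, ↓reduceIte, Nat.add_sub_cancel,
              if_pos (Nat.succ_pos i')]
            rw [if_pos hyc]
            exact aLoop_fuel t f t.length (i' + 1 + 1) oc cc _ _ _ _ (by omega) (by omega)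
        · have hF : findFrom t '\'' t.length (i' + 1) = findFrom t '\'' t.length (i' + 1 + 1) := by
            rw [findFrom_step t '\'' (i' + 1) h, if_neg hc]
          have hE : skipQuoted t '\'' t.length (i' + 1)
              = skipQuoted t '\'' t.length (i' + 1 + 1) := by
            rw [skipQuoted_step, hF, ← skipQuoted_step]
          have hnc : ¬ (t.getD (i' + 1) ' ' = '\'' ∧ some (t.getD i' ' ') ≠ some '\\') := by
            intro hx; exact hc hx.1
          rw [aLoop, if_pos h, hE]
          simp only [Bool.false_eq_true, ↓reduceIte, Nat.add_sub_cancel,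
            if_pos (Nat.succ_pos i')]
          rw [if_neg hnc]
          exact ih (i' + 1 + 1) (by omega) (by omega)
      · rw [skipQuoted_end t '\'' t.length (i' + 1) h,
          aLoop_end t _ _ oc cc _ _ _ _ h,
          aLoop_end t t.length t.length oc cc _ _ _ _ (by omega)]

-- Main loop invariant: from plain-code state, A's scan equals B's jump loop.
theorem main_eq (t : List Char) (i : Nat) (oc cc : Int) :
    ∀ fA fB, t.length ≤ i + fA → t.length ≤ i + fB →
      aLoop t fA i oc cc false false false false = bLoop t fB i oc cc := by
  intro fA fB h1 h2
  by_cases h : i < t.length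
  · obtain ⟨f, rfl⟩ : ∃ k, fA = k + 1 := ⟨fA - 1, by omega⟩
    obtain ⟨g, rfl⟩ : ∃ k, fB = k + 1 := ⟨fB - 1, by omega⟩
    rw [aLoop, bLoop, if_pos h, if_pos h]
    simp only [Bool.false_eq_true, ↓reduceIte]
    by_cases c1 : t.getD i ' ' = '/' ∧ i + 1 < t.length ∧ t.getD (i + 1) ' ' = '/'
    · rw [if_pos c1, if_pos c1]
      rw [line_skip t oc cc f (i + 2) (by omega)]
      cases hf : findFrom t '\n' t.length (i + 2) with
      | none =>
          have hE : lineExit t (i + 2) = t.length := by unfold lineExit; rw [hf]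
          rw [hE]
          exact main_eq t t.length oc cc t.length g (by omega) (by omega)
      | some j =>
          have hb := findFrom_bounds t '\n' t.length (i + 2) j hf
          have hE : lineExit t (i + 2) = j + 1 := by unfold lineExit; rw [hf]
          rw [hE]
          exact main_eq t (j + 1) oc cc t.length g (by omega) (by omega)
    · rw [if_neg c1, if_neg c1]
      by_cases c2 : t.getD i ' ' = '/' ∧ i + 1 < t.length ∧ t.getD (i + 1) ' ' = '*'
      · rw [if_pos c2, if_pos c2]
        rw [block_skip t oc cc f (i + 2) (by omega) (by omega)]
        have h21 : i + 2 - 1 = i + 1 := by omega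
        cases hf : find2From t t.length (i + 1) with
        | none =>
            have hE : blockExit t (i + 2) = t.length := by
              unfold blockExit; rw [h21, hf]
            rw [hE]
            exact main_eq t t.length oc cc t.length g (by omega) (by omega)
        | some k =>
            have hb := find2From_bounds t t.length (i + 1) k hf
            have hE : blockExit t (i + 2) = k + 2 := by
              unfold blockExit; rw [h21, hf]
            rw [hE]
            exact main_eq t (k + 2) oc cc t.length g (by omega) (by omega)
      · rw [if_neg c2, if_neg c2]
        by_cases c3 : t.getD i ' ' = '"'
        · rw [if_pos c3, if_pos c3]
          rw [str_skip t oc cc f (i + 1) (by omega) (by omega)]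
          have hb := skipQuoted_bounds t '"' t.length (i + 1) (by omega)
          exact main_eq t (skipQuoted t '"' t.length (i + 1)) oc cc t.length g
            (by omega) (by omega)
        · rw [if_neg c3, if_neg c3]
          by_cases c4 : t.getD i ' ' = '\''
          · rw [if_pos c4, if_pos c4]
            rw [chr_skip t oc cc f (i + 1) (by omega) (by omega)]
            have hb := skipQuoted_bounds t '\'' t.length (i + 1) (by omega)
            exact main_eq t (skipQuoted t '\'' t.length (i + 1)) oc cc t.length g
              (by omega) (by omega)
          · rw [if_neg c4, if_neg c4]
            by_cases c5 : t.getD i ' ' = '{'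
            · rw [if_pos c5, if_pos c5]
              exact main_eq t (i + 1) (oc + 1) cc f g (by omega) (by omega)
            · rw [if_neg c5, if_neg c5]
              by_cases c6 : t.getD i ' ' = '}'
              · rw [if_pos c6, if_pos c6]
                exact main_eq t (i + 1) oc (cc + 1) f g (by omega) (by omega)
              · rw [if_neg c6, if_neg c6]
                exact main_eq t (i + 1) oc cc f g (by omega) (by omega)
  · rw [aLoop_end t fA i oc cc _ _ _ _ h, bLoop_end t fB i oc cc h]
termination_by t.length - i
decreasing_by all_goals omega

-- ===== VERDICT (by name: the statement is the Claim_ definition above) =====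
theorem count_braces_outside_strings_py_spec : Claim_equal_count_braces_outside_strings_py := by
  intro text _
  unfold Spec_count_braces_outside_strings_py count_braces_outside_strings_py count_braces_outside_strings_py_alt
  exact main_eq text.toList 0 0 0 text.toList.length text.toList.length (by omega) (by omega)
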